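-- pv_equiv track=rewrite | github.com/mayank88-py/leetcode-top-interview-150 | bit_manipulation/201_bitwise_and_of_numbers_range.py | range_bitwise_and_bit_by_bit
-- ===== SOURCE A (Python) =====
-- def range_bitwise_and_bit_by_bit(left, right):
--     """
--     Approach 3: Bit-by-bit Analysis
--     Time Complexity: O(32) = O(1)
--     Space Complexity: O(1)
--
--     Analyze each bit position from MSB to LSB.
--     """
--     result = 0
--
--     # Check each bit from MSB to LSB (31 to 0)
--     for i in range(31, -1, -1):
--         bit_left = (left >> i) & 1
--         bit_right = (right >> i) & 1
--
--         if bit_left != bit_right: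
--             # Different bits means all subsequent bits will be 0 in AND
--             break
--
--         if bit_left == 1:  # Both bits are 1
--             result |= (1 << i)
--
--     return result
-- ===== SOURCE B (Python) =====
-- def range_bitwise_and_bit_by_bit(left, right):
--     # Lockstep common-prefix: shift both 32-bit windows right until equal,
--     # then shift the shared prefix back into place.
--     l = left & 0xFFFFFFFF
--     r = right & 0xFFFFFFFF
--     shift = 0
--     while l != r:
--         l >>= 1
--         r >>= 1
--         shift += 1
--     return l << shift
-- ===== Notes on version B (the rewrite author's own statement) =====
-- stated objective: alternative
-- what changed: B replaces A's fixed 32-iteration per-bit test-and-OR accumulation with a lockstep loop that shifts both 32-bit windows right until they coincide and then shifts the common prefix back, keeping only a shift counter.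
import Mathlib
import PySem

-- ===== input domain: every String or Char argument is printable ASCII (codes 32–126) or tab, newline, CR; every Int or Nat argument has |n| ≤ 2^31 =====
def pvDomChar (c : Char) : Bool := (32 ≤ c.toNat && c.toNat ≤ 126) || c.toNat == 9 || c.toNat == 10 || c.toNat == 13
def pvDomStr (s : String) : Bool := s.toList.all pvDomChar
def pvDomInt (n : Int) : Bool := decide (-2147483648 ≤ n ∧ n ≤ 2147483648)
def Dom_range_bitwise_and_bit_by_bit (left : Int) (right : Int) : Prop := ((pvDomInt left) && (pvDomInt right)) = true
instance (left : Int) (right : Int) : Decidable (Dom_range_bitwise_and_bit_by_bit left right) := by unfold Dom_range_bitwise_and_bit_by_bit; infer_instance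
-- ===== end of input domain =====

-- B replaces A's fixed 32-step per-bit scan/accumulate with a lockstep shift of both
-- 32-bit windows until they agree (common prefix), restoring the prefix with one shift back.

-- ===== PORT A =====
-- A's for-loop with `break`, as recursion over the index list; `x >> i` is `x >>> i.toNat`
-- (every i in range(31,-1,-1) is ≥ 0, so `.toNat` is exact), `& 1` is PySem.Int.band,
-- `result |= (1 << i)` is PySem.Int.bor with `(1:Int) <<< i.toNat`.
def pvALoop : List Int → Int → Int → Int → Int
  | [], _, _, result => result
  | i :: rest, left, right, result =>
    let bit_left := PySem.Int.band (left >>> i.toNat) 1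
    let bit_right := PySem.Int.band (right >>> i.toNat) 1
    if bit_left ≠ bit_right then result
    else pvALoop rest left right (if bit_left = 1 then PySem.Int.bor result ((1:Int) <<< i.toNat) else result)

def range_bitwise_and_bit_by_bit (left : Int) (right : Int) : Int :=
  pvALoop (PySem.List.pyRange 31 (-1) (-1)) left right 0

-- ===== PORT B =====
-- Source B's while-loop: after `& 0xFFFFFFFF` both variables are nonnegative (< 2^32) throughout,
-- so the loop state lives in Nat exactly; `l >>= 1` is Nat division by 2 and `l << shift` is
-- Nat shiftLeft — both exact for Python on these nonnegative values.
def pvBLoop (l : Nat) (r : Nat) (shift : Nat) : Nat :=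
  if l ≠ r then pvBLoop (l / 2) (r / 2) (shift + 1) else l <<< shift
termination_by l + r
decreasing_by omega

def range_bitwise_and_bit_by_bit_alt (left : Int) (right : Int) : Int :=
  ((pvBLoop (PySem.Int.band left 0xFFFFFFFF).toNat (PySem.Int.band right 0xFFFFFFFF).toNat 0 : Nat) : Int)

-- ===== PRECONDITION & SPEC =====
def Spec_range_bitwise_and_bit_by_bit (left : Int) (right : Int) (out : Int) : Prop := out = range_bitwise_and_bit_by_bit_alt left right
instance (left : Int) (right : Int) (out : Int) : Decidable (Spec_range_bitwise_and_bit_by_bit left right out) := by unfold Spec_range_bitwise_and_bit_by_bit; infer_instance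

-- ===== CLAIM (what is proved, stated in full; the proofs are below) =====
def Claim_equal_range_bitwise_and_bit_by_bit : Prop := ∀ (left : Int) (right : Int), Dom_range_bitwise_and_bit_by_bit left right → Spec_range_bitwise_and_bit_by_bit left right (range_bitwise_and_bit_by_bit left right)

-- ===== LEMMAS AND PROOFS =====

-- the 32-bit window of an Int, as a Nat
def pvWin (a : Int) : Nat := (a.emod 4294967296).toNat

theorem pvWin_lt (a : Int) : pvWin a < 2 ^ 32 := by
  unfold pvWin
  have h1 : a.emod 4294967296 < 4294967296 := Int.emod_lt_of_pos a (by norm_num)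
  omega

-- Python's `x & 0xFFFFFFFF` is the 32-bit window
theorem band_mask (a : Int) : PySem.Int.band a 0xFFFFFFFF = ((pvWin a : Nat) : Int) := by
  unfold PySem.Int.band pvWin
  have hre : a.emod 4294967296 = a % 4294967296 := rfl
  have hmask : ((0xFFFFFFFF : Int)).toNat = 2 ^ 32 - 1 := by decide
  by_cases ha : 0 ≤ a
  · rw [if_pos ha, if_pos (by norm_num), hmask, Nat.and_two_pow_sub_one_eq_mod, hre]
    omega
  · rw [if_neg ha, if_pos (by norm_num), hmask, Nat.and_comm, Nat.and_two_pow_sub_one_eq_mod, hre]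
    omega

-- what A's loop computes on bits n-1..0 (pure value of the bits OR-ed in, break included)
def pvABits : Nat → Nat → Nat → Nat
  | 0, _, _ => 0
  | n + 1, L, R =>
    if L / 2 ^ n % 2 ≠ R / 2 ^ n % 2 then 0
    else (if L / 2 ^ n % 2 = 1 then 2 ^ n else 0) + pvABits n L R

-- B's stripped-down loop value (shift counter factored out)
def pvBCore (l r : Nat) : Nat :=
  if l = r then l else 2 * pvBCore (l / 2) (r / 2)
termination_by l + r
decreasing_by omega

theorem pvBLoop_eq (l r s : Nat) : pvBLoop l r s = pvBCore l r * 2 ^ s := by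
  fun_induction pvBLoop l r s with
  | case1 l r s h ih => rw [pvBCore, if_neg h, ih, pow_succ]; ring
  | case2 l r s h => rw [pvBCore, if_pos (by omega), Nat.shiftLeft_eq]

-- bit i of left (i < 32, as A reads it) equals bit i of the 32-bit window
theorem bit_bridge (i : Nat) (hi : i < 32) (a : Int) :
    (a / 2 ^ i) % 2 = ((pvWin a / 2 ^ i % 2 : Nat) : Int) := by
  have hLval : ((pvWin a : Nat) : Int) = a % 4294967296 := by
    have hre : a.emod 4294967296 = a % 4294967296 := rfl
    unfold pvWin; omega
  have hq := Int.emod_add_mul_ediv a 4294967296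
  set q := a / 4294967296 with hqdef
  set L : Nat := pvWin a with hLdef
  have h32 : (4294967296 : Int) = 2 ^ i * (2 ^ (32 - i - 1) * 2) := by
    have he : i + (32 - i - 1 + 1) = 32 := by omega
    rw [← pow_succ, ← pow_add, he]
    norm_num
  have ha : a = L + (q * 2 ^ (32 - i - 1) * 2) * 2 ^ i := by
    have hprod : (q * 2 ^ (32 - i - 1) * 2) * 2 ^ i = 4294967296 * q := by
      rw [h32]; ring
    rw [hLval, hprod]
    linarith [hq]
  calc (a / 2 ^ i) % 2
      = ((L + (q * 2 ^ (32 - i - 1) * 2) * 2 ^ i) / 2 ^ i) % 2 := by rw [← ha]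
    _ = ((L : Int) / 2 ^ i + q * 2 ^ (32 - i - 1) * 2) % 2 := by
        rw [Int.add_mul_ediv_right _ _ (by positivity)]
    _ = ((L : Int) / 2 ^ i) % 2 := by rw [Int.add_mul_emod_self_right]
    _ = ((L / 2 ^ i % 2 : Nat) : Int) := by
        push_cast [Int.natCast_ediv, Int.natCast_emod]
        norm_num

-- A's loop unrolled: invariant `result = t * 2^n` when n bits remain
def pvIlist : Nat → List Int
  | 0 => []
  | n + 1 => ((n : Nat) : Int) :: pvIlist n

theorem pvIlist32 : PySem.List.pyRange 31 (-1) (-1) = pvIlist 32 := by decide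

theorem lor_step (t n : Nat) :
    PySem.Int.bor ((t * 2 ^ (n + 1) : Nat) : Int) ((1:Int) <<< n) = ((t * 2 ^ (n + 1) + 2 ^ n : Nat) : Int) := by
  have hs : (1:Int) <<< n = ((2 ^ n : Nat) : Int) := by simp [Int.shiftLeft_eq]
  rw [hs, PySem.Int.bor_natCast]
  congr 1
  have h1 : t * 2 ^ (n + 1) = (2 * t) <<< n := by rw [Nat.shiftLeft_eq]; ring
  have h2 : (2 ^ n : Nat) = 1 <<< n := by rw [Nat.shiftLeft_eq]; ring
  have hb : 2 * t ||| 1 = 2 * t + 1 := by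
    have h := Nat.lor_bit false t true 0
    simpa [Nat.bit] using h
  conv_lhs => rw [h1, h2]
  rw [← Nat.shiftLeft_or_distrib, hb, Nat.shiftLeft_eq]
  ring

theorem pvALoop_eq (n : Nat) (hn : n ≤ 32) (left right : Int) (t : Nat) :
    pvALoop (pvIlist n) left right ((t * 2 ^ n : Nat) : Int)
      = ((t * 2 ^ n + pvABits n (pvWin left) (pvWin right) : Nat) : Int) := by
  induction n generalizing t with
  | zero => simp [pvIlist, pvALoop, pvABits]
  | succ n ih =>
    have hn' : n ≤ 32 := by omega
    have hbit : ∀ (a : Int),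
        PySem.Int.band (a >>> n) 1 = ((pvWin a / 2 ^ n % 2 : Nat) : Int) := by
      intro a
      rw [PySem.Int.band_one, PySem.Int.mod_eq_emod_of_pos (by norm_num),
          Int.shiftRight_eq_div_pow]
      exact bit_bridge n (by omega) a
    simp only [pvIlist, pvALoop, Int.toNat_natCast, hbit]
    by_cases hd : pvWin left / 2 ^ n % 2 = pvWin right / 2 ^ n % 2
    · rw [if_neg (by simp [hd])]
      by_cases h1 : pvWin left / 2 ^ n % 2 = 1
      · rw [if_pos (by exact_mod_cast h1), lor_step,
            show (t * 2 ^ (n + 1) + 2 ^ n : Nat) = (2 * t + 1) * 2 ^ n by ring,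
            ih hn' (2 * t + 1)]
        congr 1
        simp only [pvABits]
        rw [if_neg (by simp [hd]), if_pos h1]
        ring
      · rw [if_neg (by exact_mod_cast fun h => h1 (Nat.cast_injective h)),
            show ((t * 2 ^ (n + 1) : Nat) : Int) = (((2 * t) * 2 ^ n : Nat) : Int) by congr 1; ring,
            ih hn' (2 * t)]
        congr 1
        simp only [pvABits]
        rw [if_neg (by simp [hd]), if_neg h1]
        ring
    · rw [if_pos (by exact_mod_cast fun h => hd (Nat.cast_injective h))]
      congr 1
      simp only [pvABits]
      rw [if_pos hd]
      ring

-- B returns 0 when the windows differ in their top bit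
theorem pvBCore_zero (n : Nat) (L R : Nat) (hL : L < 2 ^ (n + 1)) (hR : R < 2 ^ (n + 1))
    (h : L / 2 ^ n ≠ R / 2 ^ n) : pvBCore L R = 0 := by
  induction n generalizing L R with
  | zero =>
    rw [pvBCore, if_neg (by simpa using h), pvBCore, if_pos (by omega)]
    omega
  | succ n ih =>
    have hd : L / 2 / 2 ^ n ≠ R / 2 / 2 ^ n := by
      rw [Nat.div_div_eq_div_mul, Nat.div_div_eq_div_mul, ← pow_succ']
      exact h
    rw [pvBCore, if_neg (fun he => h (by rw [he])), ih _ _ (by omega) (by omega) hd]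

-- a shared top bit passes straight through B's loop
theorem pvBCore_top (n : Nat) (L R : Nat) (hL : L < 2 ^ n) (hR : R < 2 ^ n) :
    pvBCore (2 ^ n + L) (2 ^ n + R) = 2 ^ n + pvBCore L R := by
  induction n generalizing L R with
  | zero =>
    have h1 : L = 0 := by omega
    have h2 : R = 0 := by omega
    subst h1; subst h2
    rw [pvBCore, if_pos rfl, pvBCore, if_pos rfl]
  | succ n ih =>
    by_cases he : L = R
    · subst he; rw [pvBCore, if_pos rfl, pvBCore, if_pos rfl]
    · rw [pvBCore, if_neg (by omega), pvBCore.eq_def L R, if_neg he]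
      have h1 : (2 ^ (n+1) + L) / 2 = 2 ^ n + L / 2 := by omega
      have h2 : (2 ^ (n+1) + R) / 2 = 2 ^ n + R / 2 := by omega
      rw [h1, h2, ih (L/2) (R/2) (by omega) (by omega)]
      ring

-- pvABits only reads bits below n
theorem pvABits_congr (n : Nat) (L R L' R' : Nat) (hL : L % 2 ^ n = L' % 2 ^ n)
    (hR : R % 2 ^ n = R' % 2 ^ n) : pvABits n L R = pvABits n L' R' := by
  induction n generalizing L R L' R' with
  | zero => rfl
  | succ n ih =>
    have topbit : ∀ (m M : Nat), M / 2 ^ m % 2 = M % 2 ^ (m+1) / 2 ^ m := by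
      intro m M
      rw [pow_succ, Nat.mod_mul_right_div_self]
    have bL : L / 2 ^ n % 2 = L' / 2 ^ n % 2 := by rw [topbit, topbit, hL]
    have bR : R / 2 ^ n % 2 = R' / 2 ^ n % 2 := by rw [topbit, topbit, hR]
    have mL : L % 2 ^ n = L' % 2 ^ n := by
      rw [← Nat.mod_mod_of_dvd L (pow_dvd_pow 2 n.le_succ), hL,
          Nat.mod_mod_of_dvd L' (pow_dvd_pow 2 n.le_succ)]
    have mR : R % 2 ^ n = R' % 2 ^ n := by
      rw [← Nat.mod_mod_of_dvd R (pow_dvd_pow 2 n.le_succ), hR,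
          Nat.mod_mod_of_dvd R' (pow_dvd_pow 2 n.le_succ)]
    unfold pvABits
    rw [bL, bR, ih _ _ _ _ mL mR]

theorem pvMain (n : Nat) (L R : Nat) (hL : L < 2 ^ n) (hR : R < 2 ^ n) :
    pvABits n L R = pvBCore L R := by
  induction n generalizing L R with
  | zero =>
    have h1 : L = 0 := by omega
    have h2 : R = 0 := by omega
    subst h1; subst h2
    rw [pvBCore]; rfl
  | succ n ih =>
    have pos : 0 < 2 ^ n := by positivity
    have hdmL := Nat.div_add_mod L (2 ^ n)
    have hdmR := Nat.div_add_mod R (2 ^ n)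
    have hmL := Nat.mod_lt L pos
    have hmR := Nat.mod_lt R pos
    have hbL : L / 2 ^ n < 2 := by
      apply (Nat.div_lt_iff_lt_mul pos).mpr
      rw [pow_succ] at hL; omega
    have hbR : R / 2 ^ n < 2 := by
      apply (Nat.div_lt_iff_lt_mul pos).mpr
      rw [pow_succ] at hR; omega
    have eL : L / 2 ^ n % 2 = L / 2 ^ n := Nat.mod_eq_of_lt hbL
    have eR : R / 2 ^ n % 2 = R / 2 ^ n := Nat.mod_eq_of_lt hbR
    by_cases hd : L / 2 ^ n = R / 2 ^ n
    · by_cases h1 : L / 2 ^ n = 1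
      · have h1R : R / 2 ^ n = 1 := by omega
        have hLd : L = 2 ^ n + L % 2 ^ n := by rw [h1, mul_one] at hdmL; omega
        have hRd : R = 2 ^ n + R % 2 ^ n := by rw [h1R, mul_one] at hdmR; omega
        have step : pvABits (n+1) L R = 2 ^ n + pvABits n L R := by
          simp only [pvABits]
          rw [eL, eR, if_neg (by simp [hd]), if_pos h1]
        rw [step,
            pvABits_congr n L R (L % 2 ^ n) (R % 2 ^ n)
              (Nat.mod_mod_of_dvd L dvd_rfl).symm (Nat.mod_mod_of_dvd R dvd_rfl).symm,
            ih _ _ hmL hmR]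
        conv_rhs => rw [hLd, hRd]
        rw [pvBCore_top n _ _ hmL hmR]
      · have h0L : L / 2 ^ n = 0 := by omega
        have h0R : R / 2 ^ n = 0 := by omega
        have hL0 : L < 2 ^ n := by rw [h0L, mul_zero] at hdmL; omega
        have hR0 : R < 2 ^ n := by rw [h0R, mul_zero] at hdmR; omega
        have step : pvABits (n+1) L R = pvABits n L R := by
          simp only [pvABits]
          rw [eL, eR, if_neg (by simp [hd]), if_neg (by rw [h0L]; omega)]
          omega
        rw [step, ih _ _ hL0 hR0]
    · have step : pvABits (n+1) L R = 0 := by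
        simp only [pvABits]
        rw [eL, eR, if_pos hd]
      rw [step, pvBCore_zero n L R hL hR hd]

-- ===== VERDICT (by name: the statement is the Claim_ definition above) =====
theorem range_bitwise_and_bit_by_bit_spec : Claim_equal_range_bitwise_and_bit_by_bit := by
  intro left right _
  unfold Spec_range_bitwise_and_bit_by_bit range_bitwise_and_bit_by_bit range_bitwise_and_bit_by_bit_alt
  rw [pvIlist32, band_mask, band_mask, Int.toNat_natCast, Int.toNat_natCast, pvBLoop_eq]
  have h := pvALoop_eq 32 (le_refl 32) left right 0
  simp only [Nat.zero_mul, Nat.zero_add, Nat.cast_zero] at h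
  rw [h, pvMain 32 _ _ (pvWin_lt left) (pvWin_lt right)]
  simp
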